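-- pv_equiv track=rewrite | github.com/jonazhu/portfolio | bact_genome/final_project.py | get_best_prots
-- ===== SOURCE A (Python) =====
-- def get_best_prots(prots, n = 5):
--     #first, we need all the ones that are 1000 AA or longer
--     best_prots = []
--     for p in prots:
--         if len(p) >= 1000:
--             best_prots.append(p)
--
--     #second, we will check if it is less than n
--     #but if it is zero, we will continue
--     if len(best_prots) <= n and len(best_prots) > 0:
--         return best_prots
--
--     #case 2: get the smallest n, remove and repeat
--     smallest_prots = []
--     for i in range(n):
--         if len(best_prots) == 0:
--             break
--         current_min = find_smallest_prot(best_prots)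
--         smallest_prots.append(current_min)
--         best_prots.remove(current_min)
--
--     if len(smallest_prots) > 0:
--         return smallest_prots
--     else:
--         #case 3: get the n longest prots
--         largest_prots = []
--         for i in range(n):
--             if len(prots) == 0:
--                 break
--             current_max = find_largest_prot(prots)
--             largest_prots.append(current_max)
--             prots.remove(current_max)
--         return largest_prots
--
-- def find_smallest_prot(prots):
--     #error handling
--     if len(prots) < 1:
--         return -1 #indicates an error
--
--     current_smallest = prots[0]
--     for p in prots:
--         if len(p) < len(current_smallest):
--             current_smallest = p
--
--     return current_smallest
--
-- def find_largest_prot(prots):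
--     #error handling
--     if len(prots) < 1:
--         return -1 #indicates an error
--
--     current_largest = prots[0]
--     for p in prots:
--         if len(p) > len(current_largest):
--             current_largest = p
--
--     return current_largest
-- ===== SOURCE B (Python) =====
-- def get_best_prots(prots, n = 5):
--     # NOTE: like the original, when no protein reaches 1000 AA this removes the
--     # chosen proteins from the caller's `prots` list in place.
--     best_prots = [p for p in prots if len(p) >= 1000]
--     if 0 < len(best_prots) <= n:
--         return best_prots
--     if n <= 0:
--         return []
--     if best_prots:
--         # more than n candidates: n shortest, ascending, ties in original order
--         return sorted(best_prots, key=len)[:n]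
--     # no candidate at all: n longest of the whole list, descending
--     chosen = sorted(prots, key=len, reverse=True)[:n]
--     for p in chosen:
--         prots.remove(p)
--     return chosen
-- ===== Notes on version B (the rewrite author's own statement) =====
-- stated objective: faster
-- what changed: Replaces the repeated find_smallest/find_largest scan-and-remove selection loops by one stable sort by length plus a slice (and an up-front n<=0 early return); the in-place removal side effect on prots in the no-long-protein branch is preserved.
import Mathlib
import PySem

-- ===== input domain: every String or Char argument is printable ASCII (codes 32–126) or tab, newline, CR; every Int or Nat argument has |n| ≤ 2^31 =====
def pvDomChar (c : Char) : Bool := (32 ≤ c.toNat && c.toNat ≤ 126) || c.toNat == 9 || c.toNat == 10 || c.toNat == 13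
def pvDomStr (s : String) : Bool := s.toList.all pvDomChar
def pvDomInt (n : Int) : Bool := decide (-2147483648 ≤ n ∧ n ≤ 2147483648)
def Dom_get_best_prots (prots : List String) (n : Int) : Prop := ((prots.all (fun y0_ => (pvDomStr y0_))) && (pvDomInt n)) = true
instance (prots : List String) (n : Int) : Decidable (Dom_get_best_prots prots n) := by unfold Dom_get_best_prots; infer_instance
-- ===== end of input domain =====

-- B replaces the repeated find-smallest/find-largest + remove selection loops by a single
-- stable sort and a slice (simpler); equivalence is about the RETURN value only — when no
-- protein reaches 1000 AA both Pythons remove the chosen proteins from `prots` in place.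


-- ===== PORT A =====
-- find_smallest_prot / find_largest_prot return -1 (an int error sentinel, not a string)
-- on the empty list; every call site guards against the empty list, so the ports return
-- Option String with `none` for the (unreachable) sentinel case.
def find_smallest_prot (prots : List String) : Option String :=
  match prots with
  | [] => none
  | h :: _ =>
    some (prots.foldl (fun current_smallest p =>
      if PySem.Str.len p < PySem.Str.len current_smallest then p else current_smallest) h)

def find_largest_prot (prots : List String) : Option String :=
  match prots with
  | [] => none
  | h :: _ =>
    some (prots.foldl (fun current_largest p =>
      if PySem.Str.len p > PySem.Str.len current_largest then p else current_largest) h)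

-- the `for i in range(n)` loop of case 2; state = (smallest_prots, best_prots);
-- `.remove(current_min)` = PySem.List.remove? (always `some`: current_min ∈ best_prots)
def caseTwoLoop : Nat → List String → List String → List String × List String
  | 0, smallest_prots, best_prots => (smallest_prots, best_prots)
  | Nat.succ k, smallest_prots, best_prots =>
    if best_prots.length = 0 then (smallest_prots, best_prots)
    else
      match find_smallest_prot best_prots with
      | none => (smallest_prots, best_prots)   -- unreachable: best_prots ≠ []
      | some current_min =>
          caseTwoLoop k (smallest_prots ++ [current_min])
            ((PySem.List.remove? best_prots current_min).getD [])

-- the `for i in range(n)` loop of case 3; state = (largest_prots, prots)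
def caseThreeLoop : Nat → List String → List String → List String × List String
  | 0, largest_prots, prots => (largest_prots, prots)
  | Nat.succ k, largest_prots, prots =>
    if prots.length = 0 then (largest_prots, prots)
    else
      match find_largest_prot prots with
      | none => (largest_prots, prots)   -- unreachable: prots ≠ []
      | some current_max =>
          caseThreeLoop k (largest_prots ++ [current_max])
            ((PySem.List.remove? prots current_max).getD [])

-- case 3 of the Python mutates the caller's `prots` in place; the RETURN value is what is
-- modelled and claimed here.
def get_best_prots (prots : List String) (n : Int) : List String :=
  let best_prots := prots.foldl
    (fun best_prots p => if PySem.Str.len p ≥ 1000 then best_prots ++ [p] else best_prots) []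
  if (best_prots.length : Int) ≤ n ∧ (best_prots.length : Int) > 0 then best_prots
  else
    let smallest_prots := (caseTwoLoop n.toNat [] best_prots).1
    if (smallest_prots.length : Int) > 0 then smallest_prots
    else (caseThreeLoop n.toNat [] prots).1

-- ===== PORT B =====
-- Source B: comprehension = List.filter, sorted(…, key=len[, reverse]) = PySem.List.sorted,
-- [:n] = PySem.List.slice. Source B's last branch performs the same in-place removals on
-- `prots` as A; only the return value is modelled.
def get_best_prots_alt (prots : List String) (n : Int) : List String :=
  let best_prots := prots.filter (fun p => 1000 ≤ PySem.Str.len p)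
  if 0 < (best_prots.length : Int) ∧ (best_prots.length : Int) ≤ n then best_prots
  else if n ≤ 0 then []
  else if best_prots ≠ [] then
    PySem.List.slice (PySem.List.sorted best_prots PySem.Str.len) none (some n)
  else
    PySem.List.slice (PySem.List.sorted prots PySem.Str.len true) none (some n)

-- ===== PRECONDITION & SPEC =====
def Spec_get_best_prots (prots : List String) (n : Int) (out : List String) : Prop := out = get_best_prots_alt prots n
instance (prots : List String) (n : Int) (out : List String) : Decidable (Spec_get_best_prots prots n out) := by unfold Spec_get_best_prots; infer_instance

-- ===== CLAIM (what is proved, stated in full; the proofs are below) =====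
def Claim_equal_get_best_prots : Prop := ∀ (prots : List String) (n : Int), Dom_get_best_prots prots n → Spec_get_best_prots prots n (get_best_prots prots n)

-- ===== LEMMAS AND PROOFS =====

-- generic first-extremum machinery, instantiated with r = (· < ·) (case 2, ascending)
-- and r = flipped < (case 3, descending) on the length key
def pvFMin (r : Int → Int → Prop) [DecidableRel r] (key : String → Int)
    (h : String) (t : List String) : String :=
  t.foldl (fun cur p => if r (key p) (key cur) then p else cur) h

def pvSortedR (r : Int → Int → Prop) [DecidableRel r] (key : String → Int)
    (xs : List String) : List String :=
  xs.foldl (fun acc x => PySem.List.insertBy (fun a b => decide (r (key a) (key b))) x acc) []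

theorem pvFMin_cons (r : Int → Int → Prop) [DecidableRel r] (key : String → Int)
    (h y : String) (ys : List String) :
    pvFMin r key h (y :: ys) = pvFMin r key (if r (key y) (key h) then y else h) ys := rfl

theorem pvFMin_mem (r : Int → Int → Prop) [DecidableRel r] (key : String → Int)
    (h : String) (t : List String) : pvFMin r key h t ∈ h :: t := by
  induction t generalizing h with
  | nil => simp [pvFMin]
  | cons y ys ih =>
    rw [pvFMin_cons]
    by_cases hr : r (key y) (key h)
    · have := ih y; simp [hr] at this ⊢; tauto
    · have := ih h; simp [hr] at this ⊢; tauto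

theorem pvFMin_min (r : Int → Int → Prop) [DecidableRel r] (key : String → Int)
    (hasym : ∀ a b, r a b → ¬ r b a)
    (htr : ∀ a b c, ¬ r a b → r a c → r b c)
    (h : String) (t : List String) :
    ∀ z ∈ h :: t, ¬ r (key z) (key (pvFMin r key h t)) := by
  induction t generalizing h with
  | nil =>
    intro z hz
    simp at hz
    subst hz
    simp only [pvFMin, List.foldl_nil]
    exact fun hc => hasym _ _ hc hc
  | cons y ys ih =>
    intro z hz
    rw [pvFMin_cons]
    simp only [List.mem_cons] at hz
    by_cases hr : r (key y) (key h)
    · rw [if_pos hr]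
      rcases hz with rfl | rfl | hz
      · intro hc
        exact ih y y (by simp) (htr _ _ _ (hasym _ _ hr) hc)
      · exact ih z z (by simp)
      · exact ih y z (by simp [hz])
    · rw [if_neg hr]
      rcases hz with rfl | rfl | hz
      · exact ih z z (by simp)
      · intro hc
        exact ih h h (by simp) (htr _ _ _ hr hc)
      · exact ih h z (by simp [hz])

theorem pvFMin_append (r : Int → Int → Prop) [DecidableRel r] (key : String → Int)
    (h y : String) (t : List String) :
    pvFMin r key h (t ++ [y]) =
      if r (key y) (key (pvFMin r key h t)) then y else pvFMin r key h t := by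
  simp [pvFMin, List.foldl_append]

theorem pvSortedR_append (r : Int → Int → Prop) [DecidableRel r] (key : String → Int)
    (l : List String) (y : String) :
    pvSortedR r key (l ++ [y]) =
      PySem.List.insertBy (fun a b => decide (r (key a) (key b))) y (pvSortedR r key l) := by
  simp [pvSortedR, List.foldl_append]

-- stable sort = first extremum, then stable sort of the list with it removed
theorem pvExtract (r : Int → Int → Prop) [DecidableRel r] (key : String → Int)
    (hasym : ∀ a b, r a b → ¬ r b a)
    (htr : ∀ a b c, ¬ r a b → r a c → r b c) (t : List String) :
    ∀ h : String, pvSortedR r key (h :: t) =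
      pvFMin r key h t :: pvSortedR r key ((h :: t).erase (pvFMin r key h t)) := by
  induction t using List.reverseRecOn with
  | nil => intro h; simp [pvSortedR, pvFMin, PySem.List.insertBy]
  | append_singleton t' y ih =>
    intro h
    have hmem : pvFMin r key h t' ∈ h :: t' := pvFMin_mem r key h t'
    have hmin := pvFMin_min r key hasym htr h t'
    have hca : h :: (t' ++ [y]) = (h :: t') ++ [y] := by simp
    rw [hca, pvSortedR_append, ih h, pvFMin_append]
    by_cases hr : r (key y) (key (pvFMin r key h t'))
    · have hy : y ∉ h :: t' := fun hy => hmin y hy hr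
      rw [if_pos hr, List.erase_append_right _ hy]
      simp [PySem.List.insertBy, hr, ih h]
    · rw [if_neg hr, List.erase_append_left _ hmem, pvSortedR_append]
      simp [PySem.List.insertBy, hr]

theorem sorted_eq_pvSortedR (key : String → Int) (xs : List String) :
    PySem.List.sorted xs key = pvSortedR (fun a b => a < b) key xs := by
  rw [PySem.List.sorted_eq_foldl_insertBy]; rfl

theorem sorted_rev_eq_pvSortedR (key : String → Int) (xs : List String) :
    PySem.List.sorted xs key true = pvSortedR (fun a b => b < a) key xs := by
  rw [PySem.List.sorted_rev_eq_foldl_insertBy]; rfl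

theorem sorted_cons_min (h : String) (t : List String) :
    PySem.List.sorted (h :: t) PySem.Str.len =
      pvFMin (fun a b => a < b) PySem.Str.len h t ::
        PySem.List.sorted ((h :: t).erase (pvFMin (fun a b => a < b) PySem.Str.len h t))
          PySem.Str.len := by
  rw [sorted_eq_pvSortedR, sorted_eq_pvSortedR]
  exact pvExtract _ _ (fun a b => by omega) (fun a b c => by omega) t h

theorem sorted_rev_cons_max (h : String) (t : List String) :
    PySem.List.sorted (h :: t) PySem.Str.len true =
      pvFMin (fun a b => b < a) PySem.Str.len h t ::
        PySem.List.sorted ((h :: t).erase (pvFMin (fun a b => b < a) PySem.Str.len h t))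
          PySem.Str.len true := by
  rw [sorted_rev_eq_pvSortedR, sorted_rev_eq_pvSortedR]
  exact pvExtract _ _ (fun a b => by omega) (fun a b c => by omega) t h

theorem find_smallest_eq (h : String) (t : List String) :
    find_smallest_prot (h :: t) = some (pvFMin (fun a b => a < b) PySem.Str.len h t) := by
  simp [find_smallest_prot, pvFMin]

theorem find_largest_eq (h : String) (t : List String) :
    find_largest_prot (h :: t) = some (pvFMin (fun a b => b < a) PySem.Str.len h t) := by
  simp [find_largest_prot, pvFMin]

theorem caseTwoLoop_eq (k : Nat) :
    ∀ best acc : List String,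
      (caseTwoLoop k acc best).1 = acc ++ (PySem.List.sorted best PySem.Str.len).take k := by
  induction k with
  | zero => intro best acc; simp [caseTwoLoop]
  | succ k ih =>
    intro best acc
    cases best with
    | nil => simp [caseTwoLoop, PySem.List.sorted]
    | cons h t =>
      have hmem := pvFMin_mem (fun a b : Int => a < b) PySem.Str.len h t
      rw [caseTwoLoop, if_neg (by simp : ¬((h :: t).length = 0)), find_smallest_eq]
      dsimp only
      rw [PySem.List.remove?_eq_some_erase _ _ hmem]
      simp only [Option.getD_some]
      rw [ih, sorted_cons_min, List.take_succ_cons, List.append_assoc, List.singleton_append]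

theorem caseThreeLoop_eq (k : Nat) :
    ∀ xs acc : List String,
      (caseThreeLoop k acc xs).1 = acc ++ (PySem.List.sorted xs PySem.Str.len true).take k := by
  induction k with
  | zero => intro xs acc; simp [caseThreeLoop]
  | succ k ih =>
    intro xs acc
    cases xs with
    | nil => simp [caseThreeLoop, PySem.List.sorted]
    | cons h t =>
      have hmem := pvFMin_mem (fun a b : Int => b < a) PySem.Str.len h t
      rw [caseThreeLoop, if_neg (by simp : ¬((h :: t).length = 0)), find_largest_eq]
      dsimp only
      rw [PySem.List.remove?_eq_some_erase _ _ hmem]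
      simp only [Option.getD_some]
      rw [ih, sorted_rev_cons_max, List.take_succ_cons, List.append_assoc, List.singleton_append]

theorem slice_to_toNat (xs : List String) (n : Int) (hn : 0 ≤ n) :
    PySem.List.slice xs none (some n) = xs.take n.toNat := by
  conv_lhs => rw [← Int.toNat_of_nonneg hn]
  exact PySem.List.slice_to_natCast xs n.toNat

-- ===== VERDICT (by name: the statement is the Claim_ definition above) =====
theorem get_best_prots_spec : Claim_equal_get_best_prots := by
  intro prots n _
  unfold Spec_get_best_prots get_best_prots get_best_prots_alt
  rw [PySem.List.foldl_append_ite_eq_filter]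
  simp only [List.nil_append, ge_iff_le]
  set best := prots.filter (fun p => 1000 ≤ PySem.Str.len p) with hbest
  by_cases h1 : (best.length : Int) ≤ n ∧ (best.length : Int) > 0
  · rw [if_pos h1, if_pos ⟨h1.2, h1.1⟩]
  · rw [if_neg h1, if_neg (fun h : 0 < (best.length : Int) ∧ (best.length : Int) ≤ n =>
      h1 ⟨h.2, h.1⟩)]
    by_cases hn : n ≤ 0
    · have h0 : n.toNat = 0 := Int.toNat_of_nonpos hn
      rw [if_pos hn, h0]
      simp [caseTwoLoop, caseThreeLoop]
    · rw [if_neg hn]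
      have hn' : 0 ≤ n := by omega
      rw [caseTwoLoop_eq, List.nil_append]
      by_cases hb : best = []
      · rw [hb]
        have hsnil : PySem.List.sorted ([] : List String) PySem.Str.len = [] := rfl
        rw [hsnil]
        simp only [List.take_nil, List.length_nil, Nat.cast_zero, gt_iff_lt,
          lt_self_iff_false, if_false]
        rw [if_neg (by simp), caseThreeLoop_eq, List.nil_append, slice_to_toNat _ _ hn']
      · have hlen : 0 < ((PySem.List.sorted best PySem.Str.len).take n.toNat).length := by
          rw [List.length_take, PySem.List.length_sorted]
          have h1 : best.length ≠ 0 := fun h => hb (List.length_eq_zero_iff.mp h)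
          omega
        rw [if_pos (by exact_mod_cast hlen), if_pos (by simpa using hb),
          slice_to_toNat _ _ hn']
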